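-- pv_equiv track=rewrite | github.com/zachweisman0105/OpenDentalQueryTool | src/opendental_query/utils/sql_parser.py | _has_unquoted_semicolon
-- ===== SOURCE A (Python) =====
-- def _has_unquoted_semicolon(query: str) -> bool:
--     """Detect semicolons outside of quoted regions."""
--     in_single = False
--     in_double = False
--     in_backtick = False
--     escape = False
--
--     for ch in query:
--         if escape:
--             escape = False
--             continue
--
--         if ch == "\\" and (in_single or in_double):
--             escape = True
--             continue
--
--         if ch == "'" and not in_double and not in_backtick:
--             in_single = not in_single
--             continue
--
--         if ch == '"' and not in_single and not in_backtick:
--             in_double = not in_double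
--             continue
--
--         if ch == "`" and not in_single and not in_double:
--             in_backtick = not in_backtick
--             continue
--
--         if ch == ";" and not (in_single or in_double or in_backtick):
--             return True
--
--     return False
-- ===== SOURCE B (Python) =====
-- def _has_unquoted_semicolon(query: str) -> bool:
--     """Detect semicolons outside of quoted regions."""
--     n = len(query)
--     i = 0
--     while i < n:
--         ch = query[i]
--         if ch == ";":
--             return True
--         if ch == "'" or ch == '"':
--             i += 1
--             while i < n:
--                 c = query[i]
--                 if c == "\\":
--                     i += 2
--                 elif c == ch:
--                     i += 1
--                     break
--                 else:
--                     i += 1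
--         elif ch == "`":
--             i += 1
--             while i < n and query[i] != "`":
--                 i += 1
--             i += 1
--         else:
--             i += 1
--     return False
-- ===== Notes on version B (the rewrite author's own statement) =====
-- stated objective: alternative
-- what changed: Replaces A's single for-loop carrying four boolean flags (in_single/in_double/in_backtick/escape) with an index-based cursor walk that, on opening a quote, runs a dedicated inner skip loop to the matching close (escape-aware for '/" quotes, plain scan for backticks).
import Mathlib
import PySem

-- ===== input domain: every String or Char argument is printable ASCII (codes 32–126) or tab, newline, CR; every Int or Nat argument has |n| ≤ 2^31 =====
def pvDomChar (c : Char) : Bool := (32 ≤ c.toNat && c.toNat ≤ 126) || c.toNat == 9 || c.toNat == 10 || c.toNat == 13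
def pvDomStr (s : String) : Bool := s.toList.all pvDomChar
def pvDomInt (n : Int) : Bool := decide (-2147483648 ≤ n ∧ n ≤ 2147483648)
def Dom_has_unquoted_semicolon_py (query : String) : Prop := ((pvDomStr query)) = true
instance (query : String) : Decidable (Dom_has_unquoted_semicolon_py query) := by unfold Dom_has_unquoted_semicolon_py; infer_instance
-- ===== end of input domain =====

-- B replaces A's four-flag single pass by a cursor walk with dedicated inner skip
-- loops per quote kind (objective: alternative decomposition, same cost).

-- ===== PORT A =====
-- A's for-loop over the characters with state (in_single, in_double, in_backtick, escape).
def pvLoopA : List Char → Bool → Bool → Bool → Bool → Bool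
  | [], _, _, _, _ => false
  | c :: rest, s, d, b, e =>
    if e then pvLoopA rest s d b false
    else if c == '\\' && (s || d) then pvLoopA rest s d b true
    else if c == '\'' && !d && !b then pvLoopA rest (!s) d b e
    else if c == '"' && !s && !b then pvLoopA rest s (!d) b e
    else if c == '`' && !s && !d then pvLoopA rest s d (!b) e
    else if c == ';' && !(s || d || b) then true
    else pvLoopA rest s d b e

def has_unquoted_semicolon_py (query : String) : Bool :=
  pvLoopA query.toList false false false false

-- ===== PORT B =====
-- B's inner loop: inside a ' or " region, advance past escapes to the matching close.
def pvSkipQ (q : Char) : List Char → List Char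
  | [] => []
  | c :: rest =>
    if c == '\\' then
      match rest with
      | [] => []
      | _ :: r2 => pvSkipQ q r2
    else if c == q then rest
    else pvSkipQ q rest

-- B's inner loop: inside a ` region, advance to the matching backtick (no escapes).
def pvSkipB : List Char → List Char
  | [] => []
  | c :: rest => if c == '`' then rest else pvSkipB rest

-- length bounds cited by pvLoopB's decreasing_by
theorem pvSkipQ_length_le (q : Char) : ∀ (n : Nat) (l : List Char), l.length ≤ n →
    (pvSkipQ q l).length ≤ l.length := by
  intro n
  induction n with
  | zero =>
      intro l hl
      have : l = [] := List.length_eq_zero_iff.mp (Nat.le_zero.mp hl)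
      subst this; simp [pvSkipQ]
  | succ n ih =>
      intro l hl
      cases l with
      | nil => simp [pvSkipQ]
      | cons c rest =>
        have hr : rest.length ≤ n := by simpa using Nat.lt_succ_iff.mp (by simpa using hl)
        rw [pvSkipQ.eq_def]
        by_cases h0 : c = '\\'
        · simp only [h0, beq_self_eq_true, if_pos]
          cases rest with
          | nil => simp
          | cons c2 r2 =>
              have := ih r2 (by simp at hr ⊢; omega)
              simp at hr ⊢; omega
        · by_cases h1 : c = q
          · subst h1; simp [h0]
          · have := ih rest hr
            simp [h0, h1]; omega

theorem pvSkipB_length_le (l : List Char) : (pvSkipB l).length ≤ l.length := by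
  induction l with
  | nil => simp [pvSkipB]
  | cons c rest ih =>
      by_cases h : c = '`'
      · simp [pvSkipB, h]
      · simp [pvSkipB, h]; omega

-- B's outer cursor walk.
def pvLoopB : List Char → Bool
  | [] => false
  | c :: rest =>
    if c == ';' then true
    else if c == '\'' || c == '"' then pvLoopB (pvSkipQ c rest)
    else if c == '`' then pvLoopB (pvSkipB rest)
    else pvLoopB rest
  termination_by l => l.length
  decreasing_by
  · exact Nat.lt_succ_of_le (pvSkipQ_length_le c rest.length rest le_rfl)
  · exact Nat.lt_succ_of_le (pvSkipB_length_le rest)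
  · exact Nat.lt_succ_self _

def has_unquoted_semicolon_py_alt (query : String) : Bool :=
  pvLoopB query.toList

-- ===== PRECONDITION & SPEC =====
def Spec_has_unquoted_semicolon_py (query : String) (out : Bool) : Prop := out = has_unquoted_semicolon_py_alt query
instance (query : String) (out : Bool) : Decidable (Spec_has_unquoted_semicolon_py query out) := by unfold Spec_has_unquoted_semicolon_py; infer_instance

-- ===== CLAIM (what is proved, stated in full; the proofs are below) =====
def Claim_equal_has_unquoted_semicolon_py : Prop := ∀ (query : String), Dom_has_unquoted_semicolon_py query → Spec_has_unquoted_semicolon_py query (has_unquoted_semicolon_py query)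

-- ===== LEMMAS AND PROOFS =====

theorem pvSkipQ_close (q : Char) (rest : List Char) (h : ¬ q = '\\') :
    pvSkipQ q (q :: rest) = rest := by
  rw [pvSkipQ.eq_def]; simp [h]

theorem pvSkipQ_other (q c : Char) (rest : List Char) (h0 : ¬ c = '\\') (h1 : ¬ c = q) :
    pvSkipQ q (c :: rest) = pvSkipQ q rest := by
  rw [pvSkipQ.eq_def]; simp [h0, h1]

theorem pvSkipQ_bs_nil (q : Char) : pvSkipQ q ['\\'] = [] := by
  rw [pvSkipQ.eq_def]; simp

theorem pvSkipQ_bs_cons (q c2 : Char) (r2 : List Char) :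
    pvSkipQ q ('\\' :: c2 :: r2) = pvSkipQ q r2 := by
  rw [pvSkipQ.eq_def]; simp

theorem pvSkipB_tick (rest : List Char) : pvSkipB ('`' :: rest) = rest := by
  simp [pvSkipB]

theorem pvSkipB_other (c : Char) (rest : List Char) (h : ¬ c = '`') :
    pvSkipB (c :: rest) = pvSkipB rest := by
  simp [pvSkipB, h]

-- The combined invariant: A's flag machine in each of its four reachable states
-- computes what B's corresponding loop computes.
theorem pvKey : ∀ (n : Nat) (l : List Char), l.length ≤ n →
    (pvLoopA l false false false false = pvLoopB l) ∧
    (pvLoopA l true false false false = pvLoopB (pvSkipQ '\'' l)) ∧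
    (pvLoopA l false true false false = pvLoopB (pvSkipQ '"' l)) ∧
    (pvLoopA l false false true false = pvLoopB (pvSkipB l)) := by
  intro n
  induction n with
  | zero =>
      intro l hl
      have : l = [] := List.length_eq_zero_iff.mp (Nat.le_zero.mp hl)
      subst this
      simp [pvLoopA, pvLoopB, pvSkipQ, pvSkipB]
  | succ n ih =>
      intro l hl
      cases l with
      | nil => simp [pvLoopA, pvLoopB, pvSkipQ, pvSkipB]
      | cons c rest =>
        have hr : rest.length ≤ n := by simpa using Nat.lt_succ_iff.mp (by simpa using hl)
        refine ⟨?_, ?_, ?_, ?_⟩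
        · -- outside any quote
          by_cases h1 : c = '\''
          · subst h1; simp [pvLoopA, pvLoopB, (ih rest hr).2.1]
          · by_cases h2 : c = '"'
            · subst h2; simp [pvLoopA, pvLoopB, (ih rest hr).2.2.1]
            · by_cases h3 : c = '`'
              · subst h3; simp [pvLoopA, pvLoopB, (ih rest hr).2.2.2]
              · by_cases h4 : c = ';'
                · subst h4; simp [pvLoopA, pvLoopB]
                · simp [pvLoopA, pvLoopB, h1, h2, h3, h4, (ih rest hr).1]
        · -- inside a single-quoted region
          by_cases h0 : c = '\\'
          · subst h0
            cases rest with
            | nil => simp [pvLoopA, pvSkipQ_bs_nil, pvLoopB]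
            | cons c2 r2 =>
                have hr2 : r2.length ≤ n := by simp at hr; omega
                simp [pvLoopA, pvSkipQ_bs_cons, (ih r2 hr2).2.1]
          · by_cases h1 : c = '\''
            · subst h1; simp [pvLoopA, pvSkipQ_close, (ih rest hr).1]
            · rw [pvSkipQ_other '\'' c rest h0 (by simp [h1])]
              simp [pvLoopA, h0, h1, (ih rest hr).2.1]
        · -- inside a double-quoted region
          by_cases h0 : c = '\\'
          · subst h0
            cases rest with
            | nil => simp [pvLoopA, pvSkipQ_bs_nil, pvLoopB]
            | cons c2 r2 =>
                have hr2 : r2.length ≤ n := by simp at hr; omega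
                simp [pvLoopA, pvSkipQ_bs_cons, (ih r2 hr2).2.2.1]
          · by_cases h1 : c = '"'
            · subst h1; simp [pvLoopA, pvSkipQ_close, (ih rest hr).1]
            · rw [pvSkipQ_other '"' c rest h0 (by simp [h1])]
              simp [pvLoopA, h0, h1, (ih rest hr).2.2.1]
        · -- inside a backtick region
          by_cases h1 : c = '`'
          · subst h1; simp [pvLoopA, pvSkipB_tick, (ih rest hr).1]
          · rw [pvSkipB_other c rest h1]
            simp [pvLoopA, h1, (ih rest hr).2.2.2]

-- ===== VERDICT (by name: the statement is the Claim_ definition above) =====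
theorem has_unquoted_semicolon_py_spec : Claim_equal_has_unquoted_semicolon_py := by
  intro query _
  unfold Spec_has_unquoted_semicolon_py has_unquoted_semicolon_py has_unquoted_semicolon_py_alt
  exact (pvKey query.toList.length query.toList le_rfl).1
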